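-- pv_equiv track=rewrite | github.com/DiegoAlb09/Euler2D | generator/topology_codes.py | generate_vcc_string
-- ===== SOURCE A (Python) =====
-- def generate_vcc_string(N1, N3):
--     """
--     Genera la cadena de código VCC usando codificación ternaria (0,1,2)
--
--     Args:
--         N1: Número de vértices con una conexión
--         N3: Número de vértices con tres conexiones
--
--     Returns:
--         str: Cadena que representa el código VCC en base 3
--     """
--     # Convertir N1 y N3 a base 3
--     def to_base3(n):
--         if n == 0:
--             return "0"
--         digits = []
--         while n:
--             digits.append(str(n % 3))
--             n //= 3
--         return "".join(reversed(digits))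
--
--     N1_base3 = to_base3(N1).zfill(6)  # 6 dígitos en base 3
--     N3_base3 = to_base3(N3).zfill(6)
--
--     # Combinar las cadenas
--     vcc_string = f"{N1_base3}{N3_base3}"
--
--     return vcc_string
-- ===== SOURCE B (Python) =====
-- def generate_vcc_string(N1, N3):
--     def render(n):
--         width = 6
--         while 3 ** width <= n:
--             width += 1
--         return ''.join(str((n // 3 ** i) % 3) for i in range(width - 1, -1, -1))
--     return render(N1) + render(N3)
-- ===== Notes on version B (the rewrite author's own statement) =====
-- stated objective: alternative
-- what changed: Replaces the LSB-first digit-accumulating while loop + reverse + zfill with a most-significant-first positional build: compute the width max(6, base-3 digit count) and emit (n // 3**i) % 3 directly from high position to low, so no digit list, no reversal and no padding step exist.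
import Mathlib
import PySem

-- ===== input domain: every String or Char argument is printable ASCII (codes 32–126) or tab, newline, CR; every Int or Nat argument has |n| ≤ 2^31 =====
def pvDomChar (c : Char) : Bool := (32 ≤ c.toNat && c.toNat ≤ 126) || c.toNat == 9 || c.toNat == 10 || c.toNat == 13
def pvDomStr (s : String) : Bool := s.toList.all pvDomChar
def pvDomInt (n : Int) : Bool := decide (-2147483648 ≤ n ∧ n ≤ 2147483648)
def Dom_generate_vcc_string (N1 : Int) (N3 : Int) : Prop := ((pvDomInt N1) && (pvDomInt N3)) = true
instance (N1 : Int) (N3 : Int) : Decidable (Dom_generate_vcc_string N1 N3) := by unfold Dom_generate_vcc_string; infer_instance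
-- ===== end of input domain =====

-- B replaces A's LSB-first digit loop + reverse + zfill by a MSB-first positional build (alternative decomposition, same cost).

-- ===== PORT A =====
-- the 'while n: digits.append(str(n % 3)); n //= 3' loop; the 0 < n guard makes it
-- total in Lean (Python diverges for n < 0, which Pre_ excludes)
def pvToBase3Digits (n : Int) : List String :=
  if h : 0 < n then
    PySem.Int.toStr (PySem.Int.mod n 3) :: pvToBase3Digits (PySem.Int.floordiv n 3)
  else []
termination_by n.toNat
decreasing_by
  rw [PySem.Int.floordiv_eq_ediv_of_pos (by omega)]
  omega

-- to_base3
def pvToBase3 (n : Int) : String :=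
  if n = 0 then "0" else PySem.Str.join "" (pvToBase3Digits n).reverse

def generate_vcc_string (N1 : Int) (N3 : Int) : String :=
  PySem.Str.zfill (pvToBase3 N1) 6 ++ PySem.Str.zfill (pvToBase3 N3) 6

-- ===== PORT B =====
-- 'width = 6; while 3 ** width <= n: width += 1'
def pvWidth (n : Int) (w : Nat) : Nat :=
  if h : (3:Int) ^ w ≤ n then pvWidth n (w + 1) else w
termination_by (n + 1 - 3 ^ w).toNat
decreasing_by
  have h1 : (1:Int) ≤ 3 ^ w := one_le_pow₀ (by norm_num)
  omega

-- render(n): ''.join(str((n // 3 ** i) % 3) for i in range(width - 1, -1, -1))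
def pvRenderB (n : Int) : String :=
  let w := pvWidth n 6
  PySem.Str.join "" ((PySem.List.pyRange ((w : Int) - 1) (-1) (-1)).map
    (fun i => PySem.Int.toStr (PySem.Int.mod (PySem.Int.floordiv n ((3:Int) ^ i.toNat)) 3)))

def generate_vcc_string_alt (N1 : Int) (N3 : Int) : String :=
  pvRenderB N1 ++ pvRenderB N3

-- ===== PRECONDITION & SPEC =====
-- Pre_ excludes negative inputs: there A's 'while n' loop never terminates (n //= 3 stalls at -1),
-- so A returns on exactly the inputs Pre_ admits.
def Pre_generate_vcc_string (N1 : Int) (N3 : Int) : Prop := 0 ≤ N1 ∧ 0 ≤ N3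
instance (N1 : Int) (N3 : Int) : Decidable (Pre_generate_vcc_string N1 N3) := by
  unfold Pre_generate_vcc_string; infer_instance
def pvWitness_generate_vcc_string : Int × Int := (5, 10)

def Spec_generate_vcc_string (N1 : Int) (N3 : Int) (out : String) : Prop := out = generate_vcc_string_alt N1 N3
instance (N1 : Int) (N3 : Int) (out : String) : Decidable (Spec_generate_vcc_string N1 N3 out) := by unfold Spec_generate_vcc_string; infer_instance

-- ===== CLAIM (what is proved, stated in full; the proofs are below) =====
def Claim_equal_generate_vcc_string : Prop := ∀ (N1 : Int) (N3 : Int), Dom_generate_vcc_string N1 N3 → Pre_generate_vcc_string N1 N3 → Spec_generate_vcc_string N1 N3 (generate_vcc_string N1 N3)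

-- ===== LEMMAS AND PROOFS =====

-- canonical MSB-first digit string of m rendered at width k
def pvRenderN : Nat → Nat → List Char
  | _, 0 => []
  | m, k + 1 => pvRenderN (m / 3) k ++ [Nat.digitChar (m % 3)]

-- MSB-first base-3 digits of m (empty for 0)
def pvDigitsN (m : Nat) : List Char :=
  if h : m = 0 then [] else pvDigitsN (m / 3) ++ [Nat.digitChar (m % 3)]
decreasing_by exact Nat.div_lt_self (by omega) (by omega)

theorem pvJoinNil (ps : List (List Char)) : PySem.Chars.join [] ps = ps.flatten := by
  induction ps with
  | nil => simp [PySem.Chars.join, List.intercalate]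
  | cons a l ih => cases l with
    | nil => simp [PySem.Chars.join, List.intercalate]
    | cons b t =>
      rw [PySem.Chars.join_cons_cons, ih]
      simp

theorem pvToChars_small (d : Nat) (hd : d < 3) :
    PySem.Int.toChars ((d : Nat) : Int) = [Nat.digitChar d] := by
  interval_cases d <;> decide

-- peeling the TOP digit off pvRenderN
theorem pvRenderN_succ (m k : Nat) :
    pvRenderN m (k + 1) = Nat.digitChar (m / 3 ^ k % 3) :: pvRenderN m k := by
  induction k generalizing m with
  | zero => simp [pvRenderN]
  | succ k ih =>
    show pvRenderN (m / 3) (k + 1) ++ [Nat.digitChar (m % 3)] = _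
    rw [ih]
    have : m / 3 / 3 ^ k = m / 3 ^ (k + 1) := by
      rw [Nat.div_div_eq_div_mul, pow_succ']
    rw [this]
    rfl

-- leading zeros when m fits in k digits
theorem pvRenderN_pad (m k j : Nat) (h : m < 3 ^ k) :
    pvRenderN m (j + k) = List.replicate j '0' ++ pvRenderN m k := by
  induction j with
  | zero => simp
  | succ j ih =>
    have hz : m / 3 ^ (j + k) = 0 :=
      Nat.div_eq_of_lt (lt_of_lt_of_le h (Nat.pow_le_pow_right (by omega) (by omega)))
    have : j + 1 + k = (j + k) + 1 := by omega
    rw [this, pvRenderN_succ, hz]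
    simp [ih, List.replicate_succ, show Nat.digitChar 0 = '0' from by decide]

theorem pvDigitsN_len_pos (m : Nat) (hm : m ≠ 0) : 0 < (pvDigitsN m).length := by
  rw [pvDigitsN]; simp [hm]

theorem pvDigitsN_lt (m : Nat) : m < 3 ^ (pvDigitsN m).length := by
  induction m using Nat.strong_induction_on with
  | _ m ih =>
    by_cases hm : m = 0
    · subst hm; simp [pvDigitsN]
    · rw [pvDigitsN]; simp only [hm, dite_false]
      have ih3 := ih (m / 3) (Nat.div_lt_self (by omega) (by omega))
      have hp : 3 ^ ((pvDigitsN (m / 3)).length + 1) = 3 * 3 ^ (pvDigitsN (m / 3)).length := by ring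
      have := Nat.div_add_mod m 3
      simp only [List.length_append, List.length_singleton]
      omega

theorem pvDigitsN_le (m : Nat) (hm : m ≠ 0) : 3 ^ ((pvDigitsN m).length - 1) ≤ m := by
  induction m using Nat.strong_induction_on with
  | _ m ih =>
    rw [pvDigitsN]; simp only [hm, dite_false]
    by_cases h3 : m / 3 = 0
    · simp [h3, pvDigitsN]; omega
    · have ih3 := ih (m / 3) (Nat.div_lt_self (by omega) (by omega)) h3
      have hl := pvDigitsN_len_pos (m / 3) h3
      simp only [List.length_append, List.length_singleton]
      have he : (pvDigitsN (m / 3)).length + 1 - 1 = ((pvDigitsN (m / 3)).length - 1) + 1 := by omega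
      rw [he]
      have : 3 ^ (((pvDigitsN (m / 3)).length - 1) + 1) = 3 * 3 ^ ((pvDigitsN (m / 3)).length - 1) := by ring
      have := Nat.div_add_mod m 3
      omega

theorem pvDigitsN_digits (m : Nat) : ∀ c ∈ pvDigitsN m, c = '0' ∨ c = '1' ∨ c = '2' := by
  induction m using Nat.strong_induction_on with
  | _ m ih =>
    by_cases hm : m = 0
    · subst hm; simp [pvDigitsN]
    · rw [pvDigitsN]; simp only [hm, dite_false]
      intro c hc
      rcases List.mem_append.mp hc with h | h
      · exact ih (m / 3) (Nat.div_lt_self (by omega) (by omega)) c h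
      · have : m % 3 = 0 ∨ m % 3 = 1 ∨ m % 3 = 2 := by omega
        simp only [List.mem_singleton] at h
        rcases this with h3 | h3 | h3 <;> rw [h, h3] <;> simp [Nat.digitChar]

theorem pvDigitsN_render (m : Nat) (hm : m ≠ 0) :
    pvDigitsN m = pvRenderN m (pvDigitsN m).length := by
  induction m using Nat.strong_induction_on with
  | _ m ih =>
    rw [pvDigitsN]; simp only [hm, dite_false]
    simp only [List.length_append, List.length_singleton]
    show _ = pvRenderN (m / 3) (pvDigitsN (m / 3)).length ++ [Nat.digitChar (m % 3)]
    by_cases h3 : m / 3 = 0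
    · simp [h3, pvDigitsN, pvRenderN]
    · rw [← ih (m / 3) (Nat.div_lt_self (by omega) (by omega)) h3]

-- A's pre-zfill string: ['0'] for 0, the digit list otherwise
def pvACore (m : Nat) : List Char := if m = 0 then ['0'] else pvDigitsN m

theorem pvACore_render (m : Nat) : pvACore m = pvRenderN m (pvACore m).length := by
  by_cases hm : m = 0
  · subst hm; simp [pvACore, pvRenderN, show Nat.digitChar 0 = '0' from by decide]
  · simp only [pvACore, hm, if_false]; exact pvDigitsN_render m hm

theorem pvACore_lt (m : Nat) : m < 3 ^ (pvACore m).length := by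
  by_cases hm : m = 0
  · subst hm; simp [pvACore]
  · simp only [pvACore, hm, if_false]; exact pvDigitsN_lt m

theorem pvACore_len_pos (m : Nat) : 0 < (pvACore m).length := by
  by_cases hm : m = 0
  · subst hm; simp [pvACore]
  · simp only [pvACore, hm, if_false]; exact pvDigitsN_len_pos m hm

theorem pvACore_le (m : Nat) (h : 6 < (pvACore m).length) : 3 ^ ((pvACore m).length - 1) ≤ m := by
  by_cases hm : m = 0
  · subst hm; simp [pvACore] at h
  · simp only [pvACore, hm, if_false] at h ⊢; exact pvDigitsN_le m hm

theorem pvACore_digits (m : Nat) : ∀ c ∈ pvACore m, c = '0' ∨ c = '1' ∨ c = '2' := by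
  by_cases hm : m = 0
  · subst hm; simp [pvACore]
  · simp only [pvACore, hm, if_false]; exact pvDigitsN_digits m

-- A's digit loop produces pvDigitsN (joined, reversed)
theorem pvToBase3Digits_join (m : Nat) :
    (((pvToBase3Digits ((m : Nat) : Int)).reverse).map String.toList).flatten = pvDigitsN m := by
  induction m using Nat.strong_induction_on with
  | _ m ih =>
    by_cases hm : m = 0
    · subst hm; rw [pvToBase3Digits]; simp [pvDigitsN]
    · rw [pvToBase3Digits]
      have h0 : (0:Int) < (m : Nat) := by exact_mod_cast Nat.pos_of_ne_zero hm
      simp only [h0, dite_true]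
      rw [show (3:Int) = ((3:Nat):Int) from rfl, PySem.Int.mod_natCast, PySem.Int.floordiv_natCast]
      rw [pvDigitsN]; simp only [hm, dite_false]
      simp only [List.reverse_cons, List.map_append, List.flatten_append]
      rw [ih (m / 3) (Nat.div_lt_self (by omega) (by omega))]
      simp only [List.map_cons, List.map_nil, List.flatten_cons, List.flatten_nil, List.append_nil]
      rw [PySem.Int.toList_toStr, pvToChars_small (m % 3) (by omega)]

-- A's half, as chars: the zero-padded render at width max 6 len
theorem pvA_half (m : Nat) :
    (PySem.Str.zfill (pvToBase3 ((m : Nat) : Int)) 6).toList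
      = pvRenderN m (max 6 (pvACore m).length) := by
  have hcore : (pvToBase3 ((m : Nat) : Int)).toList = pvACore m := by
    unfold pvToBase3 pvACore
    by_cases hm : m = 0
    · subst hm; simp
    · have : ((m : Nat) : Int) ≠ 0 := by exact_mod_cast hm
      simp only [this, if_false, hm, if_false]
      rw [PySem.Str.toList_join, show ("" : String).toList = ([] : List Char) from rfl, pvJoinNil]
      exact pvToBase3Digits_join m
  rw [PySem.Str.toList_zfill, hcore]
  have hlen := pvACore_len_pos m
  have hdig := pvACore_digits m
  -- zfill on an unsigned nonempty string = left-pad with zeros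
  have hz : PySem.Chars.zfill (pvACore m) 6
      = List.replicate (6 - (pvACore m).length) '0' ++ pvACore m := by
    unfold PySem.Chars.zfill
    by_cases h6 : (6:Int) ≤ (pvACore m).length
    · have : 6 - (pvACore m).length = 0 := by omega
      simp [h6, this]
    · simp only [h6, if_false]
      cases hc : pvACore m with
      | nil => simp [hc] at hlen
      | cons c rest =>
        have := hdig c (by simp [hc])
        have hcs : ¬ (c = '+' ∨ c = '-') := by rcases this with h|h|h <;> subst h <;> decide
        simp only [hcs, if_false]
        rw [← hc]
        rfl
  rw [hz]
  have hmax : max 6 (pvACore m).length = (6 - (pvACore m).length) + (pvACore m).length := by omega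
  rw [hmax, pvRenderN_pad m _ _ (pvACore_lt m), ← pvACore_render m]

-- B's width search finds any K ≥ L that brackets m
theorem pvWidth_eq (m : Nat) (L K : Nat) (hLK : L ≤ K) (hup : (m : Int) < 3 ^ K)
    (hlo : ∀ j, L ≤ j → j < K → (3:Int) ^ j ≤ m) : pvWidth ((m : Nat) : Int) L = K := by
  obtain ⟨d, hd⟩ : ∃ d, K = L + d := ⟨K - L, by omega⟩
  subst hd
  clear hLK
  induction d generalizing L with
  | zero =>
    rw [pvWidth]
    simp only [Nat.add_zero] at hup
    simp [not_le.mpr hup]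
  | succ d ih =>
    rw [pvWidth]
    have h3 : (3:Int) ^ L ≤ (m : Nat) := hlo L (by omega) (by omega)
    simp only [h3, dite_true]
    have : L + (d + 1) = (L + 1) + d := by omega
    rw [this] at hup ⊢
    exact ih (L + 1) hup (fun j hj hj' => hlo j (by omega) (by omega))

theorem pvWidth_eq_max (m : Nat) : pvWidth ((m : Nat) : Int) 6 = max 6 (pvACore m).length := by
  apply pvWidth_eq m 6 _ (le_max_left _ _)
  · have h1 : m < 3 ^ (pvACore m).length := pvACore_lt m
    have h2 : (3:Nat) ^ (pvACore m).length ≤ 3 ^ (max 6 (pvACore m).length) :=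
      Nat.pow_le_pow_right (by omega) (le_max_right _ _)
    exact_mod_cast lt_of_lt_of_le h1 h2
  · intro j hj hj'
    have hK : 6 < (pvACore m).length := by omega
    have hle := pvACore_le m hK
    have : max 6 (pvACore m).length = (pvACore m).length := by omega
    rw [this] at hj'
    have : (3:Nat) ^ j ≤ 3 ^ ((pvACore m).length - 1) := Nat.pow_le_pow_right (by omega) (by omega)
    exact_mod_cast le_trans this hle

-- B's join over the countdown range renders m at the given width
theorem pvB_join (m : Nat) (w : Nat) :
    (PySem.Str.join "" ((PySem.List.pyRange ((w : Int) - 1) (-1) (-1)).map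
      (fun i => PySem.Int.toStr (PySem.Int.mod (PySem.Int.floordiv ((m : Nat) : Int) ((3:Int) ^ i.toNat)) 3)))).toList
      = pvRenderN m w := by
  induction w with
  | zero =>
    rw [PySem.List.pyRange_neg_one_eq_nil (by norm_num)]
    simp [PySem.Str.toList_join, pvRenderN, PySem.Chars.join, List.intercalate]
  | succ w ih =>
    have hnil : ("" : String).toList = ([] : List Char) := rfl
    have hcast : ((w + 1 : Nat) : Int) - 1 = ((w : Nat) : Int) := by push_cast; ring
    rw [hcast, PySem.List.pyRange_neg_one_cons (by omega), List.map_cons,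
        PySem.Str.toList_join, hnil, List.map_cons, pvJoinNil, List.flatten_cons]
    have hrest : (((PySem.List.pyRange (((w : Nat) : Int) - 1) (-1) (-1)).map
        (fun i => PySem.Int.toStr (PySem.Int.mod (PySem.Int.floordiv ((m : Nat) : Int) ((3:Int) ^ i.toNat)) 3))).map
          String.toList).flatten = pvRenderN m w := by
      rw [← pvJoinNil, ← hnil, ← PySem.Str.toList_join]
      exact ih
    rw [hrest]
    have htn : ((w : Nat) : Int).toNat = w := by omega
    rw [htn, show ((3:Int) ^ w) = (((3 ^ w : Nat)) : Int) by push_cast; ring,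
        PySem.Int.floordiv_natCast, show (3:Int) = (((3:Nat)) : Int) from rfl, PySem.Int.mod_natCast,
        PySem.Int.toList_toStr, pvToChars_small _ (by omega), pvRenderN_succ]
    rfl

-- the two halves agree for every nonnegative input
theorem pv_half_eq (n : Int) (hn : 0 ≤ n) :
    (PySem.Str.zfill (pvToBase3 n) 6).toList = (pvRenderB n).toList := by
  obtain ⟨m, rfl⟩ : ∃ m : Nat, n = (m : Int) := ⟨n.toNat, by omega⟩
  unfold pvRenderB
  rw [pvB_join m (pvWidth ((m : Nat) : Int) 6), pvWidth_eq_max m, pvA_half m]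

-- ===== VERDICT (by name: the statement is the Claim_ definition above) =====
theorem generate_vcc_string_spec : Claim_equal_generate_vcc_string := by
  intro N1 N3 _ hpre
  unfold Spec_generate_vcc_string generate_vcc_string generate_vcc_string_alt
  apply String.ext
  show (PySem.Str.zfill (pvToBase3 N1) 6 ++ PySem.Str.zfill (pvToBase3 N3) 6).toList
      = (pvRenderB N1 ++ pvRenderB N3).toList
  rw [String.toList_append, String.toList_append, pv_half_eq N1 hpre.1, pv_half_eq N3 hpre.2]
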